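-- pv_equiv track=rewrite | github.com/morris-frank/werkzeugkasten | werkzeugkasten_engine/research_table.py | unique_header_name
-- ===== SOURCE A (Python) =====
-- def unique_header_name(headers: list[str], preferred: str) -> str:
--     candidate = preferred.strip() or "Column"
--     if candidate not in headers:
--         return candidate
--     suffix = 2
--     while f"{candidate} {suffix}" in headers:
--         suffix += 1
--     return f"{candidate} {suffix}"
-- ===== SOURCE B (Python) =====
-- def unique_header_name(headers: list[str], preferred: str) -> str:
--     candidate = preferred.strip() or "Column"
--     if candidate not in headers:
--         return candidate
--     pfx = candidate + " "
--     suffixes = {h[len(pfx):] for h in headers if h.startswith(pfx)}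
--     canonical = [r for r in suffixes if r.isdigit() and not r.startswith("0")]
--     canonical.sort(key=lambda r: (len(r), r))
--     expected = 2
--     for r in canonical:
--         s = str(expected)
--         if r == s:
--             expected += 1
--         elif (len(r), r) > (len(s), s):
--             break
--     return pfx + str(expected)
-- ===== Notes on version B (the rewrite author's own statement) =====
-- stated objective: alternative
-- what changed: A probes the header list with "candidate n" for n = 2, 3, ... until a miss; B instead builds an index of the canonical decimal suffixes found after "candidate " in the headers, sorts them in numeric order ((length, lex) on canonical digit strings), and returns the first gap >= 2 found in one scan of the sorted list, with no membership probing.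
import Mathlib
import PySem

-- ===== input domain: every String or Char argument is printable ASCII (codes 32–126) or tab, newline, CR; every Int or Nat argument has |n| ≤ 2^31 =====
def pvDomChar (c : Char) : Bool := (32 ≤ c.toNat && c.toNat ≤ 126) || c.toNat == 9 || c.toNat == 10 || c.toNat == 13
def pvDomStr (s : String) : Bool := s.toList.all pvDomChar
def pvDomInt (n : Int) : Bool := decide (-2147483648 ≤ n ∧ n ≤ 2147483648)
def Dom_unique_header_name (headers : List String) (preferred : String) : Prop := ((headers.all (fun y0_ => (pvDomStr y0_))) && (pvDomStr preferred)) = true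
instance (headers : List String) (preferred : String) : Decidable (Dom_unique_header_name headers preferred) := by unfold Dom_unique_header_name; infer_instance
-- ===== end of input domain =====

-- B replaces A's unbounded probe loop (test "candidate n" against the whole header list for
-- n = 2, 3, …) by a suffix index: extract the canonical numeric suffixes occurring after
-- "candidate " in the headers, sort them by numeric order ((length, lex) on canonical decimal
-- strings), and find the first gap ≥ 2 in one scan of the sorted list (objective: alternative).

-- ===== PORT A =====
-- A's `while f"{candidate} {suffix}" in headers` loop, transliterated with fuel.
-- Fuel headers.length + 1 is never exhausted: the loop tries pairwise distinct strings,
-- and headers can contain at most headers.length of them (proved below, pigeonhole),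
-- so the fuel-0 default is unreachable.
def uhnLoopA (headers : List String) (candidate : String) : Nat → Int → String
  | 0, suffix => candidate ++ " " ++ PySem.Int.toStr suffix
  | f + 1, suffix =>
    if headers.contains (candidate ++ " " ++ PySem.Int.toStr suffix) then
      uhnLoopA headers candidate f (suffix + 1)
    else
      candidate ++ " " ++ PySem.Int.toStr suffix

def unique_header_name (headers : List String) (preferred : String) : String :=
  let stripped := PySem.Str.strip preferred
  let candidate := if stripped = "" then "Column" else stripped
  if headers.contains candidate then
    uhnLoopA headers candidate (headers.length + 1) 2
  else
    candidate

-- ===== PORT B =====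
-- `{h[len(pfx):] for h in headers if h.startswith(pfx)}` (a set comprehension, iteration order).
def uhnRests (headers : List String) (pfx : String) : PySem.Set String :=
  PySem.Set.ofList
    ((headers.filter (fun h => PySem.Str.startswith h pfx)).map
      (fun h => PySem.Str.slice h (some (PySem.Str.len pfx)) none))

-- `[r for r in suffixes if r.isdigit() and not r.startswith("0")]`
def uhnCanonical (headers : List String) (pfx : String) : List String :=
  (uhnRests headers pfx).filter (fun r => PySem.Str.strIsdigit r && !(PySem.Str.startswith r "0"))

-- `canonical.sort(key=lambda r: (len(r), r))`; Python's tuple/str comparison is the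
-- lexicographic order on Lex (Int × List Char) (str `<` = code-point List.Lex on toList).
def uhnSorted (headers : List String) (pfx : String) : List String :=
  PySem.List.sorted (uhnCanonical headers pfx) (fun r => toLex (PySem.Str.len r, r.toList)) false

-- the `for r in canonical: …` gap scan
def uhnScan : List String → Int → Int
  | [], e => e
  | r :: rs, e =>
    let s := PySem.Int.toStr e
    if r = s then uhnScan rs (e + 1)
    else if PySem.Str.len s < PySem.Str.len r ∨
            (PySem.Str.len r = PySem.Str.len s ∧ PySem.Chars.strLt s.toList r.toList = true) then e
    else uhnScan rs e

def unique_header_name_alt (headers : List String) (preferred : String) : String :=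
  let stripped := PySem.Str.strip preferred
  let candidate := if stripped = "" then "Column" else stripped
  if headers.contains candidate then
    let pfx := candidate ++ " "
    pfx ++ PySem.Int.toStr (uhnScan (uhnSorted headers pfx) 2)
  else
    candidate

-- ===== PRECONDITION & SPEC =====
def Spec_unique_header_name (headers : List String) (preferred : String) (out : String) : Prop := out = unique_header_name_alt headers preferred
instance (headers : List String) (preferred : String) (out : String) : Decidable (Spec_unique_header_name headers preferred out) := by unfold Spec_unique_header_name; infer_instance

-- ===== CLAIM (what is proved, stated in full; the proofs are below) =====
def Claim_equal_unique_header_name : Prop := ∀ (headers : List String) (preferred : String), Dom_unique_header_name headers preferred → Spec_unique_header_name headers preferred (unique_header_name headers preferred)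

-- ===== LEMMAS AND PROOFS =====

def digRec (n : Nat) : List Char :=
  if _h : n < 10 then [Nat.digitChar n] else digRec (n / 10) ++ [Nat.digitChar (n % 10)]
decreasing_by exact Nat.div_lt_self (by omega) (by omega)

def keyLt (a b : List Char) : Prop :=
  a.length < b.length ∨ (a.length = b.length ∧ List.Lex (· < ·) a b)

lemma core_app (f : Nat) : ∀ (n : Nat) (ds : List Char),
    Nat.toDigitsCore 10 f n ds = Nat.toDigitsCore 10 f n [] ++ ds := by
  induction f with
  | zero => intro n ds; simp [Nat.toDigitsCore]
  | succ f ih =>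
    intro n ds
    simp only [Nat.toDigitsCore]
    by_cases h : n / 10 = 0
    · simp [h]
    · simp only [h, if_false]
      rw [ih (n / 10) (Nat.digitChar (n % 10) :: ds), ih (n / 10) [Nat.digitChar (n % 10)]]
      simp

lemma digRec_ne_nil (n : Nat) : digRec n ≠ [] := by
  rw [digRec]; split <;> simp

lemma digRec_def (n : Nat) :
    digRec n = if n < 10 then [Nat.digitChar n] else digRec (n / 10) ++ [Nat.digitChar (n % 10)] := by
  rw [digRec]
  by_cases h : n < 10 <;> simp [h]

lemma digRec_length_pos (n : Nat) : 0 < (digRec n).length :=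
  List.length_pos_iff.mpr (digRec_ne_nil n)

lemma core_eq_digRec : ∀ (f n : Nat), n < f → Nat.toDigitsCore 10 f n [] = digRec n := by
  intro f
  induction f with
  | zero => omega
  | succ f ih =>
    intro n hn
    simp only [Nat.toDigitsCore]
    by_cases h : n / 10 = 0
    · have h10 : n < 10 := by omega
      rw [digRec_def n]
      simp [h, h10, Nat.mod_eq_of_lt h10]
    · have h10 : ¬ n < 10 := by omega
      simp only [h, if_false]
      rw [core_app, ih (n / 10) (by omega), digRec_def n]
      simp [h10]

lemma toDigits_eq_digRec (n : Nat) : Nat.toDigits 10 n = digRec n :=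
  core_eq_digRec (n + 1) n (by omega)

lemma digit_lemmas : (∀ k < 10, PySem.Chars.isdigit (Nat.digitChar k) = true) ∧
    (∀ i < 10, ∀ j < 10, i < j → Nat.digitChar i < Nat.digitChar j) ∧
    (∀ k < 10, k ≠ 0 → Nat.digitChar k ≠ '0') := by decide

lemma digRec_digits (n : Nat) : ∀ c ∈ digRec n, PySem.Chars.isdigit c = true := by
  induction n using Nat.strong_induction_on with
  | _ n ih =>
    rw [digRec]
    split
    · next h => intro c hc; simp at hc; subst hc; exact digit_lemmas.1 n h
    · next h =>
      intro c hc
      simp only [List.mem_append, List.mem_singleton] at hc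
      rcases hc with hc | hc
      · exact ih (n / 10) (Nat.div_lt_self (by omega) (by omega)) c hc
      · subst hc; exact digit_lemmas.1 _ (Nat.mod_lt _ (by omega))

lemma digRec_head (n : Nat) :
    ∃ k l, digRec n = Nat.digitChar k :: l ∧ k < 10 ∧ (0 < n → k ≠ 0) := by
  induction n using Nat.strong_induction_on with
  | _ n ih =>
    rw [digRec]
    split
    · next h => exact ⟨n, [], rfl, h, by omega⟩
    · next h =>
      obtain ⟨k, l, hkl, hk10, hk0⟩ := ih (n / 10) (Nat.div_lt_self (by omega) (by omega))
      exact ⟨k, l ++ [Nat.digitChar (n % 10)], by rw [hkl]; simp, hk10,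
        fun _ => hk0 (by omega)⟩

lemma lex_append_same_len {a : List Char} (x y : List Char) : ∀ {b : List Char},
    a.length = b.length → List.Lex (· < ·) a b → List.Lex (· < ·) (a ++ x) (b ++ y) := by
  induction a with
  | nil =>
    intro b hl hlex
    cases hlex with
    | nil => simp at hl
  | cons c a ih =>
    intro b hl hlex
    cases hlex with
    | rel h => exact List.Lex.rel h
    | cons h => exact List.Lex.cons (ih (by simpa using hl) h)

lemma lex_append_last {c d : Char} (a : List Char) (h : c < d) :
    List.Lex (· < ·) (a ++ [c]) (a ++ [d]) := by
  induction a with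
  | nil => exact List.Lex.rel h
  | cons e a ih => exact List.Lex.cons ih

lemma digRec_keyLt : ∀ n m : Nat, m < n → keyLt (digRec m) (digRec n) := by
  intro n
  induction n using Nat.strong_induction_on with
  | _ n ih =>
    intro m hmn
    by_cases hn : n < 10
    · have hm : m < 10 := by omega
      rw [digRec_def m, digRec_def n]
      simp only [if_pos hm, if_pos hn]
      exact Or.inr ⟨rfl, List.Lex.rel (digit_lemmas.2.1 m hm n hn hmn)⟩
    · by_cases hm : m < 10
      · rw [digRec_def m, digRec_def n]
        simp only [if_pos hm, if_neg hn]
        left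
        have := digRec_length_pos (n / 10)
        simp only [List.length_append, List.length_cons, List.length_nil]
        omega
      · rcases Nat.lt_or_ge (m / 10) (n / 10) with hlt | hge
        · have hk := ih (n / 10) (Nat.div_lt_self (by omega) (by omega)) (m / 10) hlt
          rw [digRec_def m, digRec_def n]
          simp only [if_neg hm, if_neg hn]
          rcases hk with hlen | ⟨hlen, hlex⟩
          · left
            simp only [List.length_append, List.length_cons, List.length_nil]
            omega
          · right
            exact ⟨by simp [List.length_append, hlen], lex_append_same_len _ _ hlen hlex⟩
        · have heq : m / 10 = n / 10 := by omega
          have hmod : m % 10 < n % 10 := by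
            have h1 := Nat.div_add_mod m 10
            have h2 := Nat.div_add_mod n 10
            omega
          rw [digRec_def m, digRec_def n]
          simp only [if_neg hm, if_neg hn, heq]
          exact Or.inr ⟨by simp, lex_append_last _
            (digit_lemmas.2.1 _ (Nat.mod_lt _ (by omega)) _ (Nat.mod_lt _ (by omega)) hmod)⟩

lemma lt_list_char_iff (s t : List Char) : s < t ↔ List.Lex (· < ·) s t := by
  rw [← List.lt_iff_lex_lt]; rfl

lemma keyLt_irrefl (a : List Char) : ¬ keyLt a a := by
  intro h
  rcases h with h | ⟨_, h⟩
  · omega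
  · rw [← lt_list_char_iff] at h; exact lt_irrefl _ h

lemma keyLt_trans {a b c : List Char} (h1 : keyLt a b) (h2 : keyLt b c) : keyLt a c := by
  rcases h1 with h1 | ⟨h1, h1l⟩ <;> rcases h2 with h2 | ⟨h2, h2l⟩
  · left; omega
  · left; omega
  · left; omega
  · right
    refine ⟨by omega, ?_⟩
    rw [← lt_list_char_iff] at *
    exact lt_trans h1l h2l

lemma keyLt_asymm {a b : List Char} (h : keyLt a b) : ¬ keyLt b a :=
  fun h' => keyLt_irrefl a (keyLt_trans h h')

lemma keyLt_total {a b : List Char} (h : a ≠ b) : keyLt a b ∨ keyLt b a := by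
  rcases Nat.lt_trichotomy a.length b.length with hl | hl | hl
  · exact Or.inl (Or.inl hl)
  · rcases lt_trichotomy a b with hab | hab | hab
    · exact Or.inl (Or.inr ⟨hl, (lt_list_char_iff a b).mp hab⟩)
    · exact absurd hab h
    · exact Or.inr (Or.inr ⟨hl.symm, (lt_list_char_iff b a).mp hab⟩)
  · exact Or.inr (Or.inl hl)

-- toChars of a positive int is the canonical digit string
lemma toChars_pos (n : Int) (h : 0 < n) : PySem.Int.toChars n = digRec n.toNat := by
  simp only [PySem.Int.toChars]
  rw [if_neg (by omega)]
  exact toDigits_eq_digRec _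

lemma toChars_keyLt {m n : Int} (hm : 0 < m) (h : m < n) :
    keyLt (PySem.Int.toChars m) (PySem.Int.toChars n) := by
  rw [toChars_pos m hm, toChars_pos n (by omega)]
  exact digRec_keyLt _ _ (by omega)

lemma toStr_inj {m n : Int} (hm : 0 < m) (hn : 0 < n) (h : m ≠ n) :
    PySem.Int.toStr m ≠ PySem.Int.toStr n := by
  intro heq
  have hch : PySem.Int.toChars m = PySem.Int.toChars n := by
    have := congrArg String.toList heq
    rwa [PySem.Int.toList_toStr, PySem.Int.toList_toStr] at this
  rcases lt_or_gt_of_ne h with hlt | hlt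
  · have hk := toChars_keyLt hm hlt
    rw [hch] at hk
    exact keyLt_irrefl _ hk
  · have hk := toChars_keyLt hn hlt
    rw [hch] at hk
    exact keyLt_irrefl _ hk

lemma toStr_canonical (n : Int) (h : 0 < n) :
    PySem.Str.strIsdigit (PySem.Int.toStr n) = true ∧
    PySem.Str.startswith (PySem.Int.toStr n) "0" = false := by
  have hds := digRec_digits n.toNat
  have hhd := digRec_head n.toNat
  constructor
  · rw [PySem.Str.strIsdigit_eq, PySem.Int.toList_toStr, toChars_pos n h]
    obtain ⟨k, l, hkl, _, _⟩ := hhd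
    rw [hkl]
    simp only [PySem.Chars.strIsdigit, List.isEmpty_cons, Bool.not_false, Bool.true_and]
    rw [List.all_eq_true]
    intro c hc
    exact hds c (hkl ▸ hc)
  · rw [PySem.Str.startswith_eq, PySem.Int.toList_toStr, toChars_pos n h]
    obtain ⟨k, l, hkl, hk10, hk0⟩ := hhd
    rw [hkl]
    have hne : Nat.digitChar k ≠ '0' := digit_lemmas.2.2 k hk10 (hk0 (by omega))
    simp only [PySem.Chars.startswith]
    show List.isPrefixOf ('0' :: []) (Nat.digitChar k :: l) = false
    simp [List.isPrefixOf, Ne.symm hne]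

-- a string t is in B's suffix index iff "pfx t" is a header
lemma mem_uhnRests_iff (headers : List String) (pfx t : String) :
    t ∈ uhnRests headers pfx ↔ (pfx ++ t) ∈ headers := by
  unfold uhnRests
  rw [PySem.Set.mem_ofList]
  simp only [List.mem_map, List.mem_filter]
  constructor
  · rintro ⟨h, ⟨hmem, hsw⟩, hslice⟩
    rw [PySem.Str.startswith_eq, PySem.Chars.startswith_iff] at hsw
    obtain ⟨r, hr⟩ := hsw
    have ht : t.toList = r := by
      have := congrArg String.toList hslice
      rw [PySem.Str.toList_slice, PySem.Chars.slice_eq_listSlice, PySem.Str.len_eq,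
        PySem.List.slice_from _ (by positivity), ← hr] at this
      simpa using this.symm
    have : (pfx ++ t).toList = h.toList := by
      simp [← hr, ht]
    have : pfx ++ t = h := by
      apply String.toList_injective this
    rwa [this]
  · intro hmem
    refine ⟨pfx ++ t, ⟨hmem, ?_⟩, ?_⟩
    · rw [PySem.Str.startswith_eq, PySem.Chars.startswith_iff]
      exact ⟨t.toList, by simp⟩
    · apply String.toList_injective
      rw [PySem.Str.toList_slice, PySem.Chars.slice_eq_listSlice, PySem.Str.len_eq,
        PySem.List.slice_from _ (by positivity)]
      simp

-- membership of a canonical numeral in B's filtered index, in A's terms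
lemma mem_uhnCanonical_iff (headers : List String) (pfx : String) (n : Int) (h : 0 < n) :
    PySem.Int.toStr n ∈ uhnCanonical headers pfx ↔ (pfx ++ PySem.Int.toStr n) ∈ headers := by
  unfold uhnCanonical
  rw [List.mem_filter, mem_uhnRests_iff]
  have hc := toStr_canonical n h
  constructor
  · rintro ⟨h1, _⟩; exact h1
  · intro h1
    refine ⟨h1, ?_⟩
    simp only [hc.1, hc.2]
    rfl

-- Python's tuple test (len(r), r) > (len(s), s) is exactly keyLt on the char lists
lemma cond_iff_keyLt (v s : String) :
    (PySem.Str.len s < PySem.Str.len v ∨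
      (PySem.Str.len v = PySem.Str.len s ∧ PySem.Chars.strLt s.toList v.toList = true)) ↔
    keyLt s.toList v.toList := by
  unfold keyLt
  simp only [PySem.Str.len, PySem.Chars.strLt, decide_eq_true_eq]
  constructor
  · rintro (h | ⟨h1, h2⟩)
    · left; exact_mod_cast h
    · right; exact ⟨by exact_mod_cast h1.symm, (lt_list_char_iff _ _).mp h2⟩
  · rintro (h | ⟨h1, h2⟩)
    · left; exact_mod_cast h
    · right; exact ⟨by exact_mod_cast h1.symm, (lt_list_char_iff _ _).mpr h2⟩

-- the sorted index is strictly increasing in the key order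
lemma uhnSorted_pairwise (headers : List String) (pfx : String) :
    (uhnSorted headers pfx).Pairwise (fun r s => keyLt r.toList s.toList) := by
  have hp := PySem.List.sorted_pairwise (uhnCanonical headers pfx)
    (fun r => toLex (PySem.Str.len r, r.toList))
  have hnodup : (uhnCanonical headers pfx).Nodup :=
    (PySem.Set.nodup_ofList _).filter _
  have hnd : (uhnSorted headers pfx).Nodup :=
    ((PySem.List.sorted_perm _ _ _).nodup_iff).mpr hnodup
  unfold uhnSorted
  refine (hp.and hnd).imp ?_
  rintro a b ⟨hle, hne⟩
  have hlt : toLex (PySem.Str.len a, a.toList) < toLex (PySem.Str.len b, b.toList) := by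
    rcases lt_or_eq_of_le hle with hlt | heq
    · exact hlt
    · exfalso
      apply hne
      have h2 : a.toList = b.toList := congrArg (fun x => (ofLex x).2) heq
      exact String.toList_injective h2
  rw [Prod.Lex.toLex_lt_toLex] at hlt
  unfold keyLt
  rcases hlt with hl | ⟨he, hl⟩
  · left
    simp only [PySem.Str.len] at hl
    exact_mod_cast hl
  · right
    refine ⟨?_, (lt_list_char_iff _ _).mp hl⟩
    simp only [PySem.Str.len] at he
    exact_mod_cast he

lemma mem_uhnSorted_iff (headers : List String) (pfx : String) (n : Int) (h : 0 < n) :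
    PySem.Int.toStr n ∈ uhnSorted headers pfx ↔ (pfx ++ PySem.Int.toStr n) ∈ headers := by
  unfold uhnSorted
  rw [PySem.List.mem_sorted]
  exact mem_uhnCanonical_iff headers pfx n h

-- the gap scan returns the least free suffix
lemma uhnScan_spec : ∀ (L : List String), ∀ (e r : Int),
    L.Pairwise (fun r s => keyLt r.toList s.toList) → 0 < e → e ≤ r →
    PySem.Int.toStr r ∉ L →
    (∀ m, e ≤ m → m < r → PySem.Int.toStr m ∈ L) → uhnScan L e = r := by
  intro L
  induction L with
  | nil =>
    intro e r _ _ her hfree hbusy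
    rcases eq_or_lt_of_le her with rfl | hlt
    · rfl
    · exact absurd (hbusy e le_rfl hlt) (List.not_mem_nil)
  | cons v vs ih =>
    intro e r hp he her hfree hbusy
    obtain ⟨hv, hp'⟩ := List.pairwise_cons.mp hp
    simp only [uhnScan]
    by_cases h1 : v = PySem.Int.toStr e
    · rw [if_pos h1]
      have hne : e ≠ r := by
        rintro rfl
        exact hfree (h1 ▸ List.mem_cons_self)
      apply ih (e + 1) r hp' (by omega) (by omega)
      · exact fun hmem => hfree (List.mem_cons_of_mem _ hmem)
      · intro m hm1 hm2
        rcases List.mem_cons.mp (hbusy m (by omega) hm2) with heqv | hmm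
        · exact absurd (heqv.trans h1) (toStr_inj (by omega) he (by omega))
        · exact hmm
    · rw [if_neg h1]
      by_cases h2 : keyLt (PySem.Int.toStr e).toList v.toList
      · rw [if_pos ((cond_iff_keyLt v (PySem.Int.toStr e)).mpr h2)]
        by_contra hne
        have hlt : e < r := lt_of_le_of_ne her hne
        rcases List.mem_cons.mp (hbusy e le_rfl hlt) with hh | hh
        · exact h1 hh.symm
        · exact keyLt_asymm h2 (hv _ hh)
      · rw [if_neg (fun hc => h2 ((cond_iff_keyLt v (PySem.Int.toStr e)).mp hc))]
        apply ih e r hp' he her (fun hm => hfree (List.mem_cons_of_mem _ hm))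
        intro m hm1 hm2
        rcases List.mem_cons.mp (hbusy m hm1 hm2) with hh | hh
        · exfalso
          have hvne : v.toList ≠ (PySem.Int.toStr e).toList :=
            fun hx => h1 (String.toList_injective hx)
          have hvk : keyLt v.toList (PySem.Int.toStr e).toList :=
            (keyLt_total hvne).resolve_right h2
          rcases eq_or_lt_of_le hm1 with rfl | hlt2
          · exact h1 hh.symm
          · have hmono : keyLt (PySem.Int.toStr e).toList (PySem.Int.toStr m).toList := by
              rw [PySem.Int.toList_toStr, PySem.Int.toList_toStr]
              exact toChars_keyLt he hlt2
            have := keyLt_trans hvk hmono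
            rw [← hh] at this
            exact keyLt_irrefl _ this
        · exact hh

-- A's probe loop returns the least free suffix (given enough fuel)
lemma uhnLoopA_spec (headers : List String) (candidate : String) :
    ∀ (f : Nat) (s r : Int), s ≤ r → r - s < (f : Int) →
    headers.contains (candidate ++ " " ++ PySem.Int.toStr r) = false →
    (∀ m, s ≤ m → m < r → headers.contains (candidate ++ " " ++ PySem.Int.toStr m) = true) →
    uhnLoopA headers candidate f s = candidate ++ " " ++ PySem.Int.toStr r := by
  intro f
  induction f with
  | zero =>
    intro s r hsr hfuel _ _
    exact absurd hfuel (by push_cast; omega)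
  | succ f ih =>
    intro s r hsr hfuel hfree hbusy
    simp only [uhnLoopA]
    rcases eq_or_lt_of_le hsr with rfl | hlt
    · rw [if_neg (by rw [hfree]; simp)]
    · have hs := hbusy s le_rfl hlt
      rw [if_pos hs]
      exact ih (s + 1) r (by omega) (by push_cast at hfuel ⊢; omega) hfree
        (fun m hm1 hm2 => hbusy m (by omega) hm2)

-- pigeonhole: some suffix in [2, 2 + headers.length] is free
lemma exists_free_suffix (headers : List String) (candidate : String) :
    ∃ j : Nat, j ≤ headers.length ∧
      headers.contains (candidate ++ " " ++ PySem.Int.toStr (2 + (j : Int))) = false := by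
  by_contra hcon
  push_neg at hcon
  have hall : ∀ j ≤ headers.length,
      (candidate ++ " " ++ PySem.Int.toStr (2 + (j : Int))) ∈ headers := by
    intro j hj
    have := hcon j hj
    rcases hb : headers.contains (candidate ++ " " ++ PySem.Int.toStr (2 + (j : Int))) with _ | _
    · exact absurd hb this
    · simpa using hb
  have hinj : ∀ x ∈ List.range (headers.length + 1), ∀ y ∈ List.range (headers.length + 1),
      (candidate ++ " " ++ PySem.Int.toStr (2 + (x : Int))) =
      (candidate ++ " " ++ PySem.Int.toStr (2 + (y : Int))) → x = y := by
    intro x _ y _ hxy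
    by_contra hne
    apply toStr_inj (m := 2 + (x : Int)) (n := 2 + (y : Int)) (by omega) (by omega) (by omega)
    have h1 := congrArg String.toList hxy
    simp only [String.toList_append, List.append_assoc] at h1
    have h2 := List.append_cancel_left (List.append_cancel_left h1)
    exact String.toList_injective h2
  have hnd : ((List.range (headers.length + 1)).map
      (fun (j : Nat) => candidate ++ " " ++ PySem.Int.toStr (2 + (j : Int)))).Nodup :=
    List.Nodup.map_on hinj List.nodup_range
  have hsub : ((List.range (headers.length + 1)).map
      (fun (j : Nat) => candidate ++ " " ++ PySem.Int.toStr (2 + (j : Int)))) ⊆ headers := by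
    intro x hx
    rw [List.mem_map] at hx
    obtain ⟨j, hj, rfl⟩ := hx
    exact hall j (by rw [List.mem_range] at hj; omega)
  have hlen := (List.subperm_of_subset hnd hsub).length_le
  rw [List.length_map, List.length_range] at hlen
  omega

-- both programs compute the least free suffix, hence agree on the busy branch
lemma uhn_main (headers : List String) (candidate : String) :
    uhnLoopA headers candidate (headers.length + 1) 2
      = (candidate ++ " ") ++
        PySem.Int.toStr (uhnScan (uhnSorted headers (candidate ++ " ")) 2) := by
  obtain ⟨j0, hj0, hfree0⟩ := exists_free_suffix headers candidate
  have hex : ∃ j : Nat,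
      headers.contains (candidate ++ " " ++ PySem.Int.toStr (2 + (j : Int))) = false := ⟨j0, hfree0⟩
  have hfree := Nat.find_spec hex
  have hmin : ∀ k < Nat.find hex,
      headers.contains (candidate ++ " " ++ PySem.Int.toStr (2 + (k : Int))) = true := by
    intro k hk
    have hne := Nat.find_min hex hk
    rcases hb : headers.contains (candidate ++ " " ++ PySem.Int.toStr (2 + (k : Int))) with _ | _
    · exact absurd hb hne
    · rfl
  have hjle : Nat.find hex ≤ headers.length := le_trans (Nat.find_le hfree0) hj0
  have hbusyA : ∀ m : Int, 2 ≤ m → m < 2 + (Nat.find hex : Int) →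
      headers.contains (candidate ++ " " ++ PySem.Int.toStr m) = true := by
    intro m hm1 hm2
    have hm : m = 2 + (((m - 2).toNat : Nat) : Int) := by omega
    rw [hm]
    exact hmin _ (by omega)
  have hA := uhnLoopA_spec headers candidate (headers.length + 1) 2 (2 + (Nat.find hex : Int))
    (by omega) (by push_cast; omega) hfree hbusyA
  have hB : uhnScan (uhnSorted headers (candidate ++ " ")) 2 = 2 + (Nat.find hex : Int) := by
    apply uhnScan_spec _ _ _ (uhnSorted_pairwise headers (candidate ++ " "))
      (by omega) (by omega)
    · intro hmem
      rw [mem_uhnSorted_iff headers _ _ (by omega)] at hmem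
      rw [← List.contains_iff_mem] at hmem
      rw [hmem] at hfree
      exact Bool.true_eq_false.mp hfree
    · intro m hm1 hm2
      rw [mem_uhnSorted_iff headers _ _ (by omega), ← List.contains_iff_mem]
      exact hbusyA m hm1 hm2
  rw [hA, hB]

-- ===== VERDICT (by name: the statement is the Claim_ definition above) =====
theorem unique_header_name_spec : Claim_equal_unique_header_name := by
  intro headers preferred _
  unfold Spec_unique_header_name unique_header_name unique_header_name_alt
  simp only
  split <;> split <;> first | rfl | exact uhn_main headers _
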